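-- pv_equiv track=rewrite | github.com/Mabedin00/transform | matrix.py | make_scale
-- ===== SOURCE A (Python) =====
-- def make_scale( x, y, z ):
--     matrix = new_matrix()
--     for r in range( len( matrix[0] ) ):
--         for c in range( len(matrix) ):
--             if r == c:
--                 if r == 0:
--                     matrix[c][r] = x
--                 elif r == 1:
--                     matrix[c][r] = y
--                 elif r == 2:
--                     matrix[c][r] = z
--                 else:
--                     matrix[c][r] = 1
--             else:
--                 matrix[c][r] = 0
--     return matrix
--
-- def new_matrix(rows = 4, cols = 4):
--     m = []
--     for c in range( cols ):
--         m.append( [] )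
--         for r in range( rows ):
--             m[c].append( 0 )
--     return m
-- ===== SOURCE B (Python) =====
-- def make_scale(x, y, z):
--     m = [[0] * 4 for _ in range(4)]
--     m[0][0] = x
--     m[1][1] = y
--     m[2][2] = z
--     m[3][3] = 1
--     return m
-- ===== Notes on version B (the rewrite author's own statement) =====
-- stated objective: simpler
-- what changed: B builds a 4x4 zero matrix with a comprehension and assigns only the four diagonal cells directly, replacing A's 16-cell nested loop with per-cell branching.
import Mathlib
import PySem

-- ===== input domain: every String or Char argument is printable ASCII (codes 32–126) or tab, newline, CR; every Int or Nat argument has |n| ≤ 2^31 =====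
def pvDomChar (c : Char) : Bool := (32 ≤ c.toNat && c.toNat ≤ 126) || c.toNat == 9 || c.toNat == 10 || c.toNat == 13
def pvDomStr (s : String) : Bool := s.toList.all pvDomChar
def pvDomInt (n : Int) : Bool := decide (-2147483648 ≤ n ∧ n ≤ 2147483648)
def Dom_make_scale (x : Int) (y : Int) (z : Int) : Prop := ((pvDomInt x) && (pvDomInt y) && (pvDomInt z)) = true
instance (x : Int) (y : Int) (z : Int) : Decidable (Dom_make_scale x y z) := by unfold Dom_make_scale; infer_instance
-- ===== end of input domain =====

-- B replaces A's 16-cell double loop (writing every cell with a diagonal branch) by a zero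
-- matrix built with a comprehension plus four direct diagonal assignments; objective: simpler.

-- ===== PORT A =====
-- new_matrix(rows=4, cols=4): append an empty row, then append `rows` zeros to the last row.
def pv_new_matrix (rows cols : Nat) : List (List Int) :=
  (List.range cols).foldl (fun m _ =>
    let m := m ++ [[]]
    (List.range rows).foldl
      (fun m _ => m.set (m.length - 1) ((m.getD (m.length - 1) []) ++ [0])) m) []

def make_scale (x : Int) (y : Int) (z : Int) : List (List Int) :=
  let matrix := pv_new_matrix 4 4
  (List.range (matrix.getD 0 []).length).foldl (fun matrix r =>
    (List.range matrix.length).foldl (fun matrix c =>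
      let v : Int :=
        if r == c then
          if r == 0 then x else if r == 1 then y else if r == 2 then z else 1
        else 0
      matrix.set c ((matrix.getD c []).set r v)) matrix) matrix

-- ===== PORT B =====
def make_scale_alt (x : Int) (y : Int) (z : Int) : List (List Int) :=
  let m : List (List Int) := (List.range 4).map (fun _ => List.replicate 4 (0 : Int))
  let m := m.set 0 ((m.getD 0 []).set 0 x)
  let m := m.set 1 ((m.getD 1 []).set 1 y)
  let m := m.set 2 ((m.getD 2 []).set 2 z)
  let m := m.set 3 ((m.getD 3 []).set 3 1)
  m

-- ===== PRECONDITION & SPEC =====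
def Spec_make_scale (x : Int) (y : Int) (z : Int) (out : List (List Int)) : Prop := out = make_scale_alt x y z
instance (x : Int) (y : Int) (z : Int) (out : List (List Int)) : Decidable (Spec_make_scale x y z out) := by unfold Spec_make_scale; infer_instance

-- ===== CLAIM (what is proved, stated in full; the proofs are below) =====
def Claim_equal_make_scale : Prop := ∀ (x : Int) (y : Int) (z : Int), Dom_make_scale x y z → Spec_make_scale x y z (make_scale x y z)

-- ===== LEMMAS AND PROOFS =====

-- ===== VERDICT (by name: the statement is the Claim_ definition above) =====
theorem make_scale_spec : Claim_equal_make_scale := by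
  intro x y z _
  show make_scale x y z = make_scale_alt x y z
  simp [make_scale, make_scale_alt, pv_new_matrix, List.range_succ]
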